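-- pv_equiv track=rewrite | github.com/romanbarabash/python_education | tasks/interviews/types/loops.py | mod_three
-- ===== SOURCE A (Python) =====
-- def mod_three(nums: list) -> bool:
--     even_count = int()
--     odd_count = int()
--
--     for n in nums:
--         if n % 2 == 0:
--             even_count += 1
--             odd_count = 0
--         else:
--             odd_count += 1
--             even_count = 0
--
--         if even_count == 3 or odd_count == 3:
--             return True
--     return False
-- ===== SOURCE B (Python) =====
-- def mod_three(nums: list) -> bool:
--     return any(a % 2 == b % 2 == c % 2
--                for a, b, c in zip(nums, nums[1:], nums[2:]))
-- ===== Notes on version B (the rewrite author's own statement) =====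
-- stated objective: simpler
-- what changed: Replaces the two reset-on-change run counters with a stateless sliding-window any() over zipped length-3 windows comparing parities.
import Mathlib
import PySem

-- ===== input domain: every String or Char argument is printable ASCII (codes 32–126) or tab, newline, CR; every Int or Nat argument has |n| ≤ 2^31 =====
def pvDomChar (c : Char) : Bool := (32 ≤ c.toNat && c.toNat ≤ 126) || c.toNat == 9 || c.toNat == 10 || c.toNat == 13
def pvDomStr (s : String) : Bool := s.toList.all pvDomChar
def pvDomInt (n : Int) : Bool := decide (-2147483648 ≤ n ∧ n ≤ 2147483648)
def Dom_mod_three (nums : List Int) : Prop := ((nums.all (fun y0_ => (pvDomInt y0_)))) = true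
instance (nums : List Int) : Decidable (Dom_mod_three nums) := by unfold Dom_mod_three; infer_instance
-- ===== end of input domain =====

-- B replaces A's two reset-on-change run counters with a stateless any() over zipped length-3 windows (simpler decomposition, same cost).
-- ===== PORT A =====
def mod_three_loop : List Int → Int → Int → Bool
  | [], _, _ => false
  | n :: rest, even_count, odd_count =>
    let p : Int × Int :=
      if PySem.Int.mod n 2 = 0 then (even_count + 1, 0) else (0, odd_count + 1)
    if p.1 = 3 ∨ p.2 = 3 then true else mod_three_loop rest p.1 p.2

def mod_three (nums : List Int) : Bool := mod_three_loop nums 0 0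

-- ===== PORT B =====
def mod_three_alt (nums : List Int) : Bool :=
  ((nums.zip ((PySem.List.slice nums (some 1) none).zip
              (PySem.List.slice nums (some 2) none)))).any
    (fun t => PySem.Int.mod t.1 2 == PySem.Int.mod t.2.1 2 &&
              PySem.Int.mod t.2.1 2 == PySem.Int.mod t.2.2 2)

-- ===== PRECONDITION & SPEC =====
def Spec_mod_three (nums : List Int) (out : Bool) : Prop := out = mod_three_alt nums
instance (nums : List Int) (out : Bool) : Decidable (Spec_mod_three nums out) := by unfold Spec_mod_three; infer_instance

-- ===== CLAIM (what is proved, stated in full; the proofs are below) =====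
def Claim_equal_mod_three : Prop := ∀ (nums : List Int), Dom_mod_three nums → Spec_mod_three nums (mod_three nums)

-- ===== LEMMAS AND PROOFS =====

-- parity as a Bool (n is even)
def evenb (n : Int) : Bool := PySem.Int.mod n 2 == 0

-- sliding-window spec over the parity list
def winB : List Bool → Bool
  | a :: b :: c :: r => (a == b && b == c) || winB (b :: c :: r)
  | _ => false

theorem mod2_cases (n : Int) : PySem.Int.mod n 2 = 0 ∨ PySem.Int.mod n 2 = 1 := by
  have h := PySem.Int.mod_eq_emod_of_pos (a := n) (b := 2) (by omega)
  rw [h]; omega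

theorem parity_eq (a b : Int) :
    (PySem.Int.mod a 2 == PySem.Int.mod b 2) = (evenb a == evenb b) := by
  unfold evenb
  rcases mod2_cases a with ha | ha <;> rcases mod2_cases b with hb | hb <;>
    rw [ha, hb] <;> decide

theorem winB_cons_ne (a b : Bool) (r : List Bool) (h : a ≠ b) :
    winB (a :: b :: r) = winB (b :: r) := by
  cases r with
  | nil => simp [winB]
  | cons c r' => simp [winB, h]

theorem slice_one (xs : List Int) : PySem.List.slice xs (some 1) none = xs.drop 1 := by
  have h := PySem.List.slice_from_natCast (xs := xs) (a := 1)
  simpa using h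

theorem slice_two (xs : List Int) : PySem.List.slice xs (some 2) none = xs.drop 2 := by
  have h := PySem.List.slice_from_natCast (xs := xs) (a := 2)
  simpa using h

theorem alt_eq_winB (nums : List Int) :
    mod_three_alt nums = winB (nums.map evenb) := by
  unfold mod_three_alt
  rw [slice_one, slice_two]
  induction nums with
  | nil => simp [winB]
  | cons a l ih =>
    cases l with
    | nil => simp [winB]
    | cons b l' =>
      cases l' with
      | nil => simp [winB]
      | cons c r =>
        simp only [List.drop_succ_cons, List.drop_zero, List.map_cons] at ih ⊢
        simp only [List.zip_cons_cons, List.any_cons, winB]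
        rw [← ih, parity_eq a b, parity_eq b c]

theorem dvd_of_mod2_zero (n : Int) (he : PySem.Int.mod n 2 = 0) : 2 ∣ n := by
  have h := PySem.Int.mod_eq_emod_of_pos (a := n) (b := 2) (by omega)
  exact Int.dvd_of_emod_eq_zero (h ▸ he)

theorem not_dvd_of_mod2_one (n : Int) (ho : PySem.Int.mod n 2 = 1) : ¬ (2 ∣ n) := by
  have h := PySem.Int.mod_eq_emod_of_pos (a := n) (b := 2) (by omega)
  rw [h] at ho
  omega

theorem loop_step_even (n : Int) (l : List Int) (e o : Int)
    (he : PySem.Int.mod n 2 = 0) :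
    mod_three_loop (n :: l) e o =
      if e + 1 = 3 then true else mod_three_loop l (e + 1) 0 := by
  simp [mod_three_loop, dvd_of_mod2_zero n he]

theorem loop_step_odd (n : Int) (l : List Int) (e o : Int)
    (ho : PySem.Int.mod n 2 = 1) :
    mod_three_loop (n :: l) e o =
      if o + 1 = 3 then true else mod_three_loop l 0 (o + 1) := by
  simp [mod_three_loop, not_dvd_of_mod2_one n ho]

theorem loop_eq_winB (l : List Int) :
    mod_three_loop l 0 0 = winB (l.map evenb) ∧
    mod_three_loop l 1 0 = winB (true :: l.map evenb) ∧
    mod_three_loop l 2 0 = winB (true :: true :: l.map evenb) ∧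
    mod_three_loop l 0 1 = winB (false :: l.map evenb) ∧
    mod_three_loop l 0 2 = winB (false :: false :: l.map evenb) := by
  induction l with
  | nil => simp [mod_three_loop, winB]
  | cons n l ih =>
    obtain ⟨h00, h10, h20, h01, h02⟩ := ih
    rcases mod2_cases n with he | ho
    · have hev : evenb n = true := by unfold evenb; rw [he]; rfl
      simp only [List.map_cons, hev]
      refine ⟨?_, ?_, ?_, ?_, ?_⟩
      · rw [loop_step_even n l 0 0 he]; norm_num; exact h10
      · rw [loop_step_even n l 1 0 he]; norm_num; exact h20
      · rw [loop_step_even n l 2 0 he]; norm_num [winB]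
      · rw [loop_step_even n l 0 1 he]; norm_num
        rw [h10, winB_cons_ne false true _ (by simp)]
      · rw [loop_step_even n l 0 2 he]; norm_num
        rw [h10, show winB (false :: false :: true :: List.map evenb l) =
              winB (false :: true :: List.map evenb l) from by simp [winB],
            winB_cons_ne false true _ (by simp)]
    · have hev : evenb n = false := by unfold evenb; rw [ho]; rfl
      simp only [List.map_cons, hev]
      refine ⟨?_, ?_, ?_, ?_, ?_⟩
      · rw [loop_step_odd n l 0 0 ho]; norm_num; exact h01
      · rw [loop_step_odd n l 1 0 ho]; norm_num
        rw [h01, winB_cons_ne true false _ (by simp)]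
      · rw [loop_step_odd n l 2 0 ho]; norm_num
        rw [h01, show winB (true :: true :: false :: List.map evenb l) =
              winB (true :: false :: List.map evenb l) from by simp [winB],
            winB_cons_ne true false _ (by simp)]
      · rw [loop_step_odd n l 0 1 ho]; norm_num; exact h02
      · rw [loop_step_odd n l 0 2 ho]; norm_num [winB]

-- ===== VERDICT (by name: the statement is the Claim_ definition above) =====
theorem mod_three_spec : Claim_equal_mod_three := by
  intro nums _
  unfold Spec_mod_three mod_three
  rw [alt_eq_winB]
  exact (loop_eq_winB nums).1
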